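-- pv_equiv track=rewrite | github.com/alainbonardi/abclib | forPureDataLibrary/python/pdCanvasToMC.py | lookForThisInlet
-- ===== SOURCE A (Python) =====
-- def isInletTilde(myLine):
--     if ("inlet~" in myLine):
--         return True
--     else:
--         return False
--
-- def lookForThisInlet(myCode, i):
--     #final position returned
--     pos = -1
--     #line number in the code
--     ind = 0
--     #inletIndex
--     inletIndex = 0
--     for line in myCode:
--         if isInletTilde(line):
--             if (inletIndex == i):
--                 pos = ind
--             inletIndex = inletIndex + 1
--         ind = ind+1
--     return pos
-- ===== SOURCE B (Python) =====
-- def lookForThisInlet(myCode, i):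
--     # Stage 1: prefix counts: prefix[j] = number of inlet~ lines among the first j lines.
--     prefix = [0]
--     c = 0
--     for line in myCode:
--         if "inlet~" in line:
--             c = c + 1
--         prefix.append(c)
--     if i < 0 or c <= i:
--         return -1
--     # Stage 2: binary search for the smallest pos with prefix[pos + 1] > i;
--     # that pos is the line of the i-th inlet~.
--     lo = 0
--     hi = len(myCode) - 1
--     while lo < hi:
--         mid = (lo + hi) // 2
--         if prefix[mid + 1] > i:
--             hi = mid
--         else:
--             lo = mid + 1
--     return lo
-- ===== Notes on version B (the rewrite author's own statement) =====
-- stated objective: alternative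
-- what changed: B replaces A's single counting scan by two stages: it builds a prefix-count array (prefix[j] = number of inlet~ lines among the first j lines) and then binary-searches for the smallest position whose prefix count exceeds i, instead of comparing a running inlet counter against i inside the scan.
import Mathlib
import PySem

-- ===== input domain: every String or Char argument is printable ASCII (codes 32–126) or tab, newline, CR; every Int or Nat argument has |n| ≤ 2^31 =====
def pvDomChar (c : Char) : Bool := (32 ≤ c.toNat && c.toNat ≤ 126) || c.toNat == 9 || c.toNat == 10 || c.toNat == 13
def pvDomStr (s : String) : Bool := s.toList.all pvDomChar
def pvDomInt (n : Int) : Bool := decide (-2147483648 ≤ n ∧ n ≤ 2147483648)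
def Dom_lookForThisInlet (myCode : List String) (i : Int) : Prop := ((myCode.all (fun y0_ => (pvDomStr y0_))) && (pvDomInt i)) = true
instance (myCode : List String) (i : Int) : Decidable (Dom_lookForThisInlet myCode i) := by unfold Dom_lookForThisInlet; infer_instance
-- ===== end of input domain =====

-- B is an alternative algorithm (same cost): a prefix-count array followed by a binary search
-- for the smallest position whose prefix count exceeds i, instead of A's running-counter scan.

-- ===== PORT A =====
def isInletTilde (myLine : String) : Bool :=
  if PySem.Str.isIn "inlet~" myLine then true else false

-- the body of A's for-loop over the state (pos, ind, inletIndex)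
def lookStep (i : Int) (st : Int × Int × Int) (line : String) : Int × Int × Int :=
  let (pos, ind, inletIndex) := st
  if isInletTilde line then
    if inletIndex = i then (ind, ind + 1, inletIndex + 1)
    else (pos, ind + 1, inletIndex + 1)
  else (pos, ind + 1, inletIndex)

def lookForThisInlet (myCode : List String) (i : Int) : Int :=
  (myCode.foldl (lookStep i) (-1, 0, 0)).1

-- ===== PORT B =====
-- the body of B's first loop: state (prefix, c)
def prefStep (st : List Int × Int) (line : String) : List Int × Int :=
  let (pre, c) := st
  let c' := if PySem.Str.isIn "inlet~" line then c + 1 else c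
  (pre ++ [c'], c')

-- B's while-loop; the Nat argument is only a totality guard (enough fuel is always supplied:
-- the gap hi - lo shrinks every iteration, and with fuel 0 we have lo >= hi, returning lo as the loop would).
-- prefix[mid + 1] is always in range here, so pyGetD with default 0 is exact.
def bsearchB (pre : List Int) (i : Int) : Nat → Int → Int → Int
  | 0, lo, _ => lo
  | fuel + 1, lo, hi =>
    if lo < hi then
      let mid := PySem.Int.floordiv (lo + hi) 2
      if PySem.List.pyGetD pre (mid + 1) 0 > i then bsearchB pre i fuel lo mid
      else bsearchB pre i fuel (mid + 1) hi
    else lo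

def lookForThisInlet_alt (myCode : List String) (i : Int) : Int :=
  let st := myCode.foldl prefStep ([0], 0)
  if i < 0 ∨ st.2 ≤ i then -1
  else bsearchB st.1 i ((myCode.length : Int) - 1).toNat 0 ((myCode.length : Int) - 1)

-- ===== PRECONDITION & SPEC =====
def Spec_lookForThisInlet (myCode : List String) (i : Int) (out : Int) : Prop := out = lookForThisInlet_alt myCode i
instance (myCode : List String) (i : Int) (out : Int) : Decidable (Spec_lookForThisInlet myCode i out) := by unfold Spec_lookForThisInlet; infer_instance

-- ===== CLAIM (what is proved, stated in full; the proofs are below) =====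
def Claim_equal_lookForThisInlet : Prop := ∀ (myCode : List String) (i : Int), Dom_lookForThisInlet myCode i → Spec_lookForThisInlet myCode i (lookForThisInlet myCode i)

-- ===== LEMMAS AND PROOFS =====
-- number of inlet~ lines
def pCnt (cs : List String) : Nat := cs.countP (fun l => PySem.Str.isIn "inlet~" l)

-- indices (offset by ind) of the lines containing "inlet~", as A's scan visits them
def matFrom (cs : List String) (ind : Int) : List Int :=
  (PySem.List.enumerate cs ind).filterMap
    (fun p => if PySem.Str.isIn "inlet~" p.2 then some p.1 else none)

-- the same indices as Nats from 0
def matIdx : List String → List Nat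
  | [] => []
  | c :: cs => (if PySem.Str.isIn "inlet~" c then [0] else []) ++ (matIdx cs).map (· + 1)

theorem pCnt_nil : pCnt [] = 0 := rfl

theorem pCnt_cons (c : String) (l : List String) :
    pCnt (c :: l) = (if PySem.Str.isIn "inlet~" c then 1 else 0) + pCnt l := by
  simp only [pCnt, List.countP_cons]
  omega

theorem matFrom_cons (c : String) (cs : List String) (ind : Int) :
    matFrom (c :: cs) ind =
      (if PySem.Str.isIn "inlet~" c then [ind] else []) ++ matFrom cs (ind + 1) := by
  by_cases hc : PySem.Str.isIn "inlet~" c <;>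
    simp only [matFrom, PySem.List.enumerate_cons, List.filterMap_cons, hc, if_true, if_false,
      Bool.false_eq_true, List.singleton_append, List.nil_append]

theorem isInletTilde_eq (c : String) :
    isInletTilde c = PySem.Str.isIn "inlet~" c := by
  unfold isInletTilde; split <;> simp_all

-- invariant of A's loop: the result is the (i - inletIndex)-th remaining match, else pos
theorem loop_key (i : Int) : ∀ (cs : List String) (pos ind k : Int),
    (cs.foldl (lookStep i) (pos, ind, k)).1 =
      if i < k then pos else ((matFrom cs ind)[(i - k).toNat]?).getD pos := by
  intro cs
  induction cs with
  | nil =>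
    intro pos ind k
    simp [matFrom]
  | cons c cs ih =>
    intro pos ind k
    rw [List.foldl_cons, matFrom_cons]
    by_cases hc : PySem.Str.isIn "inlet~" c
    · rw [if_pos hc, List.singleton_append]
      by_cases hk : k = i
      · simp only [lookStep, isInletTilde_eq, hc, if_true, if_pos hk]
        rw [ih, if_pos (by omega), if_neg (by omega)]
        have h0 : (i - k).toNat = 0 := by omega
        rw [h0, List.getElem?_cons_zero, Option.getD_some]
      · simp only [lookStep, isInletTilde_eq, hc, if_true, if_neg (fun h => hk h)]
        rw [ih]
        by_cases hik : i < k
        · rw [if_pos (by omega), if_pos hik]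
        · rw [if_neg (by omega), if_neg hik]
          have h1 : (i - k).toNat = ((i - (k + 1)).toNat) + 1 := by omega
          rw [h1, List.getElem?_cons_succ]
    · rw [if_neg hc, List.nil_append]
      simp only [lookStep, isInletTilde_eq, hc, if_false, Bool.false_eq_true]
      exact ih pos (ind + 1) k

theorem matFrom_eq_matIdx : ∀ (cs : List String) (ind : Int),
    matFrom cs ind = (matIdx cs).map (fun q : Nat => ind + (q : Int)) := by
  intro cs
  induction cs with
  | nil => intro ind; simp [matFrom, matIdx]
  | cons c cs ih =>
    intro ind
    rw [matFrom_cons, matIdx, List.map_append, List.map_map, ih]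
    congr 1
    · split <;> simp
    · apply List.map_congr_left; intro q _
      simp only [Function.comp_apply]; push_cast; ring

theorem matIdx_length (cs : List String) : (matIdx cs).length = pCnt cs := by
  induction cs with
  | nil => rfl
  | cons c cs ih =>
    rw [matIdx, List.length_append, List.length_map, ih, pCnt_cons]
    split <;> simp

theorem matIdx_char : ∀ (cs : List String) (k p : Nat), (matIdx cs)[k]? = some p →
    pCnt (cs.take p) = k ∧ pCnt (cs.take (p + 1)) = k + 1 ∧ p < cs.length := by
  intro cs
  induction cs with
  | nil => intro k p h; simp [matIdx] at h
  | cons c cs ih =>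
    intro k p h
    by_cases hc : PySem.Str.isIn "inlet~" c
    · rw [matIdx, if_pos hc, List.singleton_append] at h
      cases k with
      | zero =>
        rw [List.getElem?_cons_zero] at h
        have hp0 : p = 0 := by simpa using h.symm
        subst hp0
        refine ⟨rfl, ?_, by simp⟩
        rw [List.take_succ_cons, List.take_zero, pCnt_cons, if_pos hc, pCnt_nil]
      | succ k =>
        rw [List.getElem?_cons_succ, List.getElem?_map] at h
        cases hx : (matIdx cs)[k]? with
        | none => rw [hx] at h; simp at h
        | some p' =>
          rw [hx] at h; simp at h
          obtain ⟨h1, h2, h3⟩ := ih k p' hx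
          have hpp : p = p' + 1 := by omega
          subst hpp
          refine ⟨?_, ?_, by rw [List.length_cons]; omega⟩
          · rw [List.take_succ_cons, pCnt_cons, if_pos hc, h1]; omega
          · rw [List.take_succ_cons, pCnt_cons, if_pos hc, h2]; omega
    · rw [matIdx, if_neg hc, List.nil_append, List.getElem?_map] at h
      cases hx : (matIdx cs)[k]? with
      | none => rw [hx] at h; simp at h
      | some p' =>
        rw [hx] at h; simp at h
        obtain ⟨h1, h2, h3⟩ := ih k p' hx
        have hpp : p = p' + 1 := by omega
        subst hpp
        refine ⟨?_, ?_, by rw [List.length_cons]; omega⟩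
        · rw [List.take_succ_cons, pCnt_cons, if_neg hc, h1]; omega
        · rw [List.take_succ_cons, pCnt_cons, if_neg hc, h2]; omega

theorem pCnt_take_mono (cs : List String) {p q : Nat} (h : p ≤ q) :
    pCnt (cs.take p) ≤ pCnt (cs.take q) := by
  have hs : (cs.take p).Sublist (cs.take q) := by
    have := List.take_sublist p (cs.take q)
    rwa [List.take_take, Nat.min_eq_left h] at this
  exact hs.countP_le

-- the prefix list that B's first loop produces after seed value c
def prefList : List String → Int → List Int
  | [], _ => []
  | d :: cs, c =>
    let c' := if PySem.Str.isIn "inlet~" d then c + 1 else c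
    c' :: prefList cs c'

theorem prefList_cons (d : String) (cs : List String) (c : Int) :
    prefList (d :: cs) c =
      (if PySem.Str.isIn "inlet~" d then c + 1 else c)
        :: prefList cs (if PySem.Str.isIn "inlet~" d then c + 1 else c) := rfl

-- B's first loop builds the prefix-count list
theorem build_spec : ∀ (cs : List String) (pr : List Int) (c : Int),
    cs.foldl prefStep (pr, c) = (pr ++ prefList cs c, c + (pCnt cs : Int)) := by
  intro cs
  induction cs with
  | nil => intro pr c; simp [prefList, pCnt_nil]
  | cons d cs ih =>
    intro pr c
    rw [List.foldl_cons]
    show cs.foldl prefStep (pr ++ [_], _) = _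
    rw [ih, Prod.mk.injEq, prefList_cons]
    refine ⟨by rw [List.append_assoc]; rfl, ?_⟩
    show (if PySem.Str.isIn "inlet~" d then c + 1 else c) + (pCnt cs : Int) = c + (pCnt (d :: cs) : Int)
    rw [pCnt_cons]; push_cast; split <;> ring

theorem prefList_length : ∀ (cs : List String) (c : Int), (prefList cs c).length = cs.length := by
  intro cs
  induction cs with
  | nil => intro c; rfl
  | cons d cs ih => intro c; rw [prefList_cons, List.length_cons, List.length_cons, ih]

theorem prefList_get? : ∀ (cs : List String) (c : Int) (k : Nat), k < cs.length →
    (prefList cs c)[k]? = some (c + (pCnt (cs.take (k + 1)) : Int)) := by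
  intro cs
  induction cs with
  | nil => intro c k hk; simp at hk
  | cons d cs ih =>
    intro c k hk
    cases k with
    | zero =>
      rw [prefList_cons, List.getElem?_cons_zero, List.take_succ_cons, List.take_zero,
        pCnt_cons, pCnt_nil, Option.some_inj]
      push_cast; split <;> ring
    | succ k =>
      rw [prefList_cons, List.getElem?_cons_succ,
        ih (if PySem.Str.isIn "inlet~" d then c + 1 else c) k (by simpa using hk),
        List.take_succ_cons, pCnt_cons, Option.some_inj]
      push_cast; split <;> ring

-- entry j of the full prefix list is the count over the first j lines
theorem prefix_get (cs : List String) (j : Int) (h0 : 0 ≤ j)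
    (hn : j ≤ (cs.length : Int)) :
    PySem.List.pyGetD (cs.foldl prefStep ([0], 0)).1 j 0 = (pCnt (cs.take j.toNat) : Int) := by
  rw [build_spec]
  show PySem.List.pyGetD ([0] ++ prefList cs 0) j 0 = _
  have key : ∀ m : Nat, m ≤ cs.length →
      ([0] ++ prefList cs 0)[m]? = some ((pCnt (cs.take m) : Int)) := by
    intro m hm
    cases m with
    | zero => simp [pCnt_nil]
    | succ k =>
      rw [List.getElem?_append_right (by simp)]
      have hidx : k + 1 - List.length [(0 : Int)] = k := by simp
      rw [hidx, prefList_get? cs 0 k (by omega), zero_add]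
  rw [PySem.List.pyGetD_eq_getElem _ _ h0
    (by rw [List.length_append, prefList_length]; simp; omega)]
  rw [← Option.some_inj, ← List.getElem?_eq_getElem]
  exact key j.toNat (by omega)

-- one unfolding of B's while-loop, with the let reduced
theorem bsearchB_succ (pre : List Int) (i : Int) (N : Nat) (lo hi : Int) :
    bsearchB pre i (N + 1) lo hi =
      if lo < hi then
        (if PySem.List.pyGetD pre (PySem.Int.floordiv (lo + hi) 2 + 1) 0 > i then
          bsearchB pre i N lo (PySem.Int.floordiv (lo + hi) 2)
        else bsearchB pre i N (PySem.Int.floordiv (lo + hi) 2 + 1) hi)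
      else lo := by
  rw [bsearchB]

-- binary-search invariant: prefix[lo] ≤ i < prefix[hi+1] is maintained and pins the result
theorem bsearch_key (pre : List Int) (i : Int) : ∀ (N : Nat) (lo hi : Int),
    (hi - lo).toNat ≤ N → lo ≤ hi →
    PySem.List.pyGetD pre lo 0 ≤ i → i < PySem.List.pyGetD pre (hi + 1) 0 →
    lo ≤ bsearchB pre i N lo hi ∧ bsearchB pre i N lo hi ≤ hi ∧
    PySem.List.pyGetD pre (bsearchB pre i N lo hi) 0 ≤ i ∧
    i < PySem.List.pyGetD pre (bsearchB pre i N lo hi + 1) 0 := by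
  intro N
  induction N with
  | zero =>
    intro lo hi hN hle hlo hhi
    have hE : lo = hi := by omega
    subst hE
    rw [bsearchB]
    exact ⟨le_refl _, le_refl _, hlo, hhi⟩
  | succ N ihN =>
    intro lo hi hN hle hlo hhi
    by_cases h : lo < hi
    · have hm : PySem.Int.floordiv (lo + hi) 2 = (lo + hi) / 2 :=
        PySem.Int.floordiv_eq_ediv_of_pos (by omega)
      have hb1 : lo ≤ PySem.Int.floordiv (lo + hi) 2 := by rw [hm]; omega
      have hb2 : PySem.Int.floordiv (lo + hi) 2 < hi := by rw [hm]; omega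
      by_cases hbr : PySem.List.pyGetD pre (PySem.Int.floordiv (lo + hi) 2 + 1) 0 > i
      · rw [bsearchB_succ, if_pos h, if_pos hbr]
        have := ihN lo (PySem.Int.floordiv (lo + hi) 2) (by omega) (by omega) hlo hbr
        exact ⟨this.1, by omega, this.2.2.1, this.2.2.2⟩
      · rw [bsearchB_succ, if_pos h, if_neg hbr]
        have := ihN (PySem.Int.floordiv (lo + hi) 2 + 1) hi (by omega) (by omega) (by omega) hhi
        exact ⟨by omega, this.2.1, this.2.2.1, this.2.2.2⟩
    · rw [bsearchB_succ, if_neg h]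
      have hE : lo = hi := by omega
      subst hE
      exact ⟨le_refl _, le_refl _, hlo, hhi⟩

-- ===== VERDICT (by name: the statement is the Claim_ definition above) =====
theorem lookForThisInlet_spec : Claim_equal_lookForThisInlet := by
  unfold Claim_equal_lookForThisInlet
  intro cs i _
  simp only [Spec_lookForThisInlet, lookForThisInlet, lookForThisInlet_alt]
  rw [loop_key]
  set n : Int := (cs.length : Int) with hn
  by_cases h0 : i < 0
  · rw [if_pos h0, if_pos (Or.inl h0)]
  · rw [if_neg h0]
    have hc2 : (cs.foldl prefStep ([0], 0)).2 = (pCnt cs : Int) := by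
      rw [build_spec]; push_cast; ring
    by_cases hcnt : (pCnt cs : Int) ≤ i
    · -- the i-th match does not exist: both return -1
      rw [if_pos (Or.inr (by rw [hc2]; exact hcnt))]
      rw [List.getElem?_eq_none, Option.getD_none]
      rw [matFrom_eq_matIdx, List.length_map, matIdx_length]; omega
    · have hcond : ¬ (i < 0 ∨ (cs.foldl prefStep ([0], 0)).2 ≤ i) := by
        rw [hc2]; omega
      rw [if_neg hcond]
      -- A returns the i-th matIdx entry
      have hlen : (i - 0).toNat < (matIdx cs).length := by rw [matIdx_length]; omega
      have hA : ((matFrom cs 0)[(i - 0).toNat]?).getD (-1)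
          = (((matIdx cs)[(i - 0).toNat]'hlen : Nat) : Int) := by
        rw [matFrom_eq_matIdx, List.getElem?_map, List.getElem?_eq_getElem hlen]
        simp
      rw [hA]
      set p : Nat := (matIdx cs)[(i - 0).toNat]'hlen with hp
      obtain ⟨hp1, hp2, hp3⟩ := matIdx_char cs _ p (by rw [List.getElem?_eq_getElem hlen])
      -- B's binary search result r
      have hne : 0 < pCnt cs := by omega
      have hn1 : (1 : Int) ≤ n := by
        have hcs : cs ≠ [] := by intro hE; subst hE; rw [pCnt_nil] at hne; omega
        have : 0 < cs.length := List.length_pos_iff.mpr hcs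
        omega
      have hlo0 : PySem.List.pyGetD (cs.foldl prefStep ([0], 0)).1 0 0 ≤ i := by
        rw [prefix_get cs 0 (by omega) (by omega)]
        simp only [Int.toNat_zero, List.take_zero, pCnt_nil]; omega
      have hhi0 : i < PySem.List.pyGetD (cs.foldl prefStep ([0], 0)).1 ((n - 1) + 1) 0 := by
        have hEq : (n - 1) + 1 = n := by ring
        rw [hEq, prefix_get cs n (by omega) (by omega)]
        rw [hn]; simp only [Int.toNat_natCast, List.take_length]; omega
      obtain ⟨hr1, hr2, hr3, hr4⟩ :=
        bsearch_key (cs.foldl prefStep ([0], 0)).1 i (n - 1).toNat 0 (n - 1)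
          (by omega) (by omega) hlo0 hhi0
      set r : Int := bsearchB (cs.foldl prefStep ([0], 0)).1 i (n - 1).toNat 0 (n - 1) with hr
      rw [prefix_get cs r (by omega) (by omega)] at hr3
      rw [prefix_get cs (r + 1) (by omega) (by omega)] at hr4
      -- uniqueness: both p and r bracket i between consecutive prefix counts
      by_contra hne2
      have hi0 : (i - 0).toNat = i.toNat := by omega
      rcases lt_or_gt_of_ne (show (p : Int) ≠ r from fun hE => hne2 hE) with hlt | hgt
      · -- p < r: pCnt (take (p+1)) = i.toNat + 1 ≤ pCnt (take r.toNat) ≤ i, absurd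
        have hle : p + 1 ≤ r.toNat := by omega
        have := pCnt_take_mono cs hle
        rw [hp2, hi0] at this
        omega
      · -- r < p: i < pCnt (take (r+1).toNat) ≤ pCnt (take p) = i.toNat
        have hle : (r + 1).toNat ≤ p := by omega
        have := pCnt_take_mono cs hle
        rw [hp1, hi0] at this
        omega
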